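-- pv_equiv track=rewrite | github.com/alisitki/quantlab-backend | tools/phase6_candidate_review_v0.py | latest_by_pack_id
-- ===== SOURCE A (Python) =====
-- from typing import Any, Dict, List, Optional, Sequence, Tuple
--
-- def latest_by_pack_id(records: List[Dict[str, Any]]) -> Dict[str, Dict[str, Any]]:
--     latest: Dict[str, Dict[str, Any]] = {}
--     for rec in records:
--         pack_id = str(rec.get("pack_id", "")).strip()
--         if not pack_id:
--             continue
--         latest[pack_id] = dict(rec)
--     return {pack_id: latest[pack_id] for pack_id in sorted(latest.keys())}
-- ===== SOURCE B (Python) =====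
-- def latest_by_pack_id(records):
--     pack_ids = set()
--     for rec in records:
--         p = str(rec.get("pack_id", "")).strip()
--         if p:
--             pack_ids.add(p)
--     out = {}
--     for pid in sorted(pack_ids):
--         for rec in reversed(records):
--             if str(rec.get("pack_id", "")).strip() == pid:
--                 out[pid] = dict(rec)
--                 break
--     return out
-- ===== Notes on version B (the rewrite author's own statement) =====
-- stated objective: alternative
-- what changed: B is a staged two-phase algorithm: first collect the set of non-empty pack_ids, then for each id in sorted order do a dedicated backwards scan of the records for its last occurrence, instead of A's single forward pass maintaining a dict of overwritten entries.
import Mathlib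
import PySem

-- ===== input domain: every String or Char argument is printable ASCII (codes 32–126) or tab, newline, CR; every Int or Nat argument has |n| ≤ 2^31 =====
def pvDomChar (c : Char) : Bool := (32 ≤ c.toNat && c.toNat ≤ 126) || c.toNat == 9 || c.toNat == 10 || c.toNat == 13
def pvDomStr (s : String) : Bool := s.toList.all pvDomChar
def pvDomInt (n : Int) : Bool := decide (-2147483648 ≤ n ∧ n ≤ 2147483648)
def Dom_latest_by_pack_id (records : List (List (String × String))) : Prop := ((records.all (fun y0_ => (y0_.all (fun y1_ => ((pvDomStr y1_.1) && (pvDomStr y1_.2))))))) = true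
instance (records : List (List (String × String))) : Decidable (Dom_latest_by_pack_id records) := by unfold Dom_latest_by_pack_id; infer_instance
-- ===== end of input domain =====

-- B is a staged two-phase algorithm (collect the set of non-empty pack_ids, then one dedicated
-- backwards scan per sorted id) instead of A's single forward pass over a dict; objective: alternative.

-- the pack id of a record: str(rec.get("pack_id", "")).strip()
def pvPid (rec : List (String × String)) : String :=
  PySem.Str.strip ((PySem.Dict.ofList rec).getD "pack_id" "")

-- ===== PORT A =====
-- A's loop body: skip empty pack_id, else overwrite latest[pack_id] = dict(rec)
def pvStepA (latest : PySem.Dict String (PySem.Dict String String))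
    (rec : List (String × String)) : PySem.Dict String (PySem.Dict String String) :=
  let pid := pvPid rec
  if pid = "" then latest else latest.insert pid (PySem.Dict.ofList rec)

-- 'latest' after A's forward loop
def pvLatestA (records : List (List (String × String))) : PySem.Dict String (PySem.Dict String String) :=
  records.foldl pvStepA PySem.Dict.empty

def latest_by_pack_id (records : List (List (String × String))) : List (String × List (String × String)) :=
  (PySem.List.sorted (pvLatestA records).keys (fun k => k) false).map
    (fun k => (k, ((pvLatestA records).getD k PySem.Dict.empty).items))

-- ===== PORT B =====
-- phase 1: the set of non-empty pack ids, in first-seen order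
def pvPids (records : List (List (String × String))) : PySem.Set String :=
  records.foldl (fun s rec =>
    let p := pvPid rec
    if p = "" then s else PySem.Set.add s p) PySem.Set.empty

-- phase 2: for each sorted id, scan the records backwards for its last occurrence (break at first hit)
def latest_by_pack_id_alt (records : List (List (String × String))) : List (String × List (String × String)) :=
  (PySem.List.sorted (pvPids records) (fun k => k) false).foldl
    (fun out pid =>
      match records.reverse.find? (fun rec => pvPid rec == pid) with
      | some rec => out ++ [(pid, (PySem.Dict.ofList rec).items)]
      | none => out) []

-- ===== PRECONDITION & SPEC =====
def Spec_latest_by_pack_id (records : List (List (String × String))) (out : List (String × List (String × String))) : Prop := out = latest_by_pack_id_alt records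
instance (records : List (List (String × String))) (out : List (String × List (String × String))) : Decidable (Spec_latest_by_pack_id records out) := by unfold Spec_latest_by_pack_id; infer_instance

-- ===== CLAIM (what is proved, stated in full; the proofs are below) =====
def Claim_equal_latest_by_pack_id : Prop := ∀ (records : List (List (String × String))), Dom_latest_by_pack_id records → Spec_latest_by_pack_id records (latest_by_pack_id records)

-- ===== LEMMAS AND PROOFS =====

-- a record contributing key k: non-empty pack_id equal to k
def pvGood (k : String) (rec : List (String × String)) : Bool :=
  !(pvPid rec == "") && (pvPid rec == k)

-- A's loop: the value at k is the LAST good record's dict (first of the reversed list)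
theorem pvGetA (rs : List (List (String × String)))
    (d0 : PySem.Dict String (PySem.Dict String String)) (k : String) :
    (rs.foldl pvStepA d0).get? k
      = Option.or ((rs.reverse.find? (pvGood k)).map PySem.Dict.ofList) (d0.get? k) := by
  induction rs generalizing d0 with
  | nil => simp
  | cons r rs ih =>
    simp only [List.foldl_cons, List.reverse_cons, List.find?_append, ih]
    cases h : rs.reverse.find? (pvGood k) with
    | some d => simp
    | none =>
      simp only [Option.map_none, Option.none_or]
      by_cases hp : pvPid r = ""
      · rw [List.find?_cons_of_neg (by simp [pvGood, hp])]
        simp [pvStepA, hp]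
      · by_cases hk : pvPid r = k
        · subst hk
          rw [List.find?_cons_of_pos (by simp [pvGood, hp])]
          simp [pvStepA, hp, PySem.Dict.get?_insert_self]
        · rw [List.find?_cons_of_neg (by simp [pvGood, hk])]
          simp [pvStepA, hp, PySem.Dict.get?_insert_of_ne _ _ (Ne.symm hk)]

theorem pvNodupA (rs : List (List (String × String)))
    (d0 : PySem.Dict String (PySem.Dict String String))
    (h : d0.keys.Nodup) : (rs.foldl pvStepA d0).keys.Nodup := by
  induction rs generalizing d0 with
  | nil => exact h
  | cons r rs ih =>
    simp only [List.foldl_cons]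
    apply ih
    unfold pvStepA
    by_cases hp : pvPid r = ""
    · simpa [hp] using h
    · simpa [hp] using PySem.Dict.nodup_keys_insert _ _ _ h

-- pvGood k is the plain id test once k is known non-empty
theorem pvGood_eq (k : String) (hk : k ≠ "") :
    pvGood k = (fun rec => pvPid rec == k) := by
  funext rec
  by_cases h : pvPid rec = k
  · simp [pvGood, h, hk]
  · simp [pvGood, h]

-- phase 1's filtered fold is a plain Set.add fold over the filterMap
theorem pvFoldAdd (rs : List (List (String × String))) (s0 : PySem.Set String) :
    rs.foldl (fun s rec =>
        let p := pvPid rec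
        if p = "" then s else PySem.Set.add s p) s0
      = (rs.filterMap (fun rec => if pvPid rec = "" then none else some (pvPid rec))).foldl
          PySem.Set.add s0 := by
  induction rs generalizing s0 with
  | nil => rfl
  | cons r rs ih =>
    by_cases hp : pvPid r = ""
    · simp only [List.foldl_cons, List.filterMap_cons, hp]
      exact ih s0
    · simp only [List.foldl_cons, List.filterMap_cons, if_neg hp]
      exact ih _

-- phase 1 is set(filterMap …)
theorem pvPids_eq (records : List (List (String × String))) :
    pvPids records
      = PySem.Set.ofList (records.filterMap
          (fun rec => if pvPid rec = "" then none else some (pvPid rec))) := by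
  rw [PySem.Set.ofList_eq_foldl]
  exact pvFoldAdd records PySem.Set.empty

theorem pvMemPids (records : List (List (String × String))) (k : String) :
    k ∈ pvPids records ↔ ∃ rec ∈ records, pvGood k rec = true := by
  rw [pvPids_eq, PySem.Set.mem_ofList, List.mem_filterMap]
  constructor
  · rintro ⟨rec, hm, hif⟩
    by_cases hp : pvPid rec = ""
    · simp [hp] at hif
    · refine ⟨rec, hm, ?_⟩
      simp only [if_neg hp, Option.some.injEq] at hif
      have hk : k ≠ "" := hif ▸ hp
      simp [pvGood, hif, hk]
  · rintro ⟨rec, hm, hg⟩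
    have hp : pvPid rec ≠ "" := by
      intro h; simp [pvGood, h] at hg
    have hk : pvPid rec = k := by
      by_contra h; simp [pvGood, h] at hg
    subst hk
    exact ⟨rec, hm, by simp [if_neg hp]⟩

-- membership in A's key set
theorem pvMemKeysA (records : List (List (String × String))) (k : String) :
    k ∈ (pvLatestA records).keys ↔ ∃ rec ∈ records, pvGood k rec = true := by
  rw [← not_iff_not, ← PySem.Dict.get?_eq_none_iff_not_mem_keys]
  unfold pvLatestA
  rw [pvGetA]
  simp only [PySem.Dict.get?_empty, Option.or_none, Option.map_eq_none_iff,
    List.find?_eq_none, List.mem_reverse]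
  constructor
  · intro h hex
    obtain ⟨rec, hm, hg⟩ := hex
    exact absurd hg (by simpa using h rec hm)
  · intro h rec hm hg
    exact h ⟨rec, hm, by simpa using hg⟩

-- the two key collections are permutations
theorem pvKeysPerm (records : List (List (String × String))) :
    (pvLatestA records).keys.Perm (pvPids records) := by
  rw [List.perm_ext_iff_of_nodup
    (by unfold pvLatestA; exact pvNodupA _ _ PySem.Dict.nodup_keys_empty)
    (by rw [pvPids_eq]; exact PySem.Set.nodup_ofList _)]
  intro k
  rw [pvMemKeysA, pvMemPids]

-- the per-id backwards scan of B, as an Option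
def pvScanB (records : List (List (String × String))) (pid : String) :
    Option (String × List (String × String)) :=
  (records.reverse.find? (fun rec => pvPid rec == pid)).map
    (fun rec => (pid, (PySem.Dict.ofList rec).items))

-- B's fold with append-on-hit is a filterMap of the backwards scans
theorem pvFoldFilterMap (records : List (List (String × String))) (l : List String)
    (acc : List (String × List (String × String))) :
    l.foldl (fun out pid =>
        match records.reverse.find? (fun rec => pvPid rec == pid) with
        | some rec => out ++ [(pid, (PySem.Dict.ofList rec).items)]
        | none => out) acc
      = acc ++ l.filterMap (pvScanB records) := by
  induction l generalizing acc with
  | nil => simp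
  | cons x xs ih =>
    cases h : records.reverse.find? (fun rec => pvPid rec == x) with
    | some rec => simp [pvScanB, h, ih]
    | none => simp [pvScanB, h, ih]

-- a filterMap that always hits is a map
theorem pvFilterMapEqMap {α β : Type} (g : α → Option β) (f : α → β) (l : List α)
    (h : ∀ x ∈ l, g x = some (f x)) : l.filterMap g = l.map f := by
  induction l with
  | nil => rfl
  | cons x xs ih =>
    simp only [List.filterMap_cons, h x (List.mem_cons_self), List.map_cons]
    rw [ih (fun y hy => h y (List.mem_cons_of_mem _ hy))]

-- ===== VERDICT (by name: the statement is the Claim_ definition above) =====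
theorem latest_by_pack_id_spec : Claim_equal_latest_by_pack_id := by
  intro records _
  unfold Spec_latest_by_pack_id latest_by_pack_id latest_by_pack_id_alt
  rw [pvFoldFilterMap, List.nil_append,
    ← (PySem.List.sorted_id_eq_sorted_id_iff_perm _ _).mpr (pvKeysPerm records)]
  symm
  apply pvFilterMapEqMap
  intro k hk
  rw [PySem.List.mem_sorted] at hk
  have hmem := (pvMemKeysA records k).mp hk
  obtain ⟨rec0, hm0, hg0⟩ := hmem
  have hkne : k ≠ "" := by
    intro h; subst h
    simp [pvGood] at hg0
  have hfind : ∃ rec, records.reverse.find? (pvGood k) = some rec := by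
    rw [← Option.isSome_iff_exists, List.find?_isSome]
    exact ⟨rec0, by simpa using hm0, hg0⟩
  obtain ⟨rec, hrec⟩ := hfind
  have hget : (pvLatestA records).get? k = some (PySem.Dict.ofList rec) := by
    unfold pvLatestA
    rw [pvGetA, hrec]
    simp
  unfold pvScanB
  rw [← pvGood_eq k hkne, hrec]
  simp [PySem.Dict.getD_eq_get?_getD, hget]
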